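-- pv_equiv track=rewrite | github.com/ravenCondol/daily_byte | 3_SingleRowKeyboard/main.py | single_row_recursive
-- ===== SOURCE A (Python) =====
-- row1 = ['q', 'w', 'e', 'r', 't', 'y', 'u', 'i', 'o', 'p']
--
-- row2 = ['a', 's', 'd', 'f', 'g', 'h', 'j', 'k', 'l']
--
-- def get_row(char):
--     if char in row1:
--         return 1
--     elif char in row2:
--         return 2
--     else:
--         return 3
--
-- def single_row_recursive(arr):
--     if len(arr) == 0:
--         return []
--
--     item = arr[0]
--     retArr = []
--     if item == "":
--         retArr.append(item)
--     else:
--         row = get_row(item[0])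
--         for index, letter in enumerate(item):
--             if get_row(letter) != row:
--                 break
--             if index == len(item)-1:
--                 retArr.append(item)
--     retArr = retArr + single_row_recursive(arr[1:])
--     return retArr
-- ===== SOURCE B (Python) =====
-- ROW1 = set("qwertyuiop")
-- ROW2 = set("asdfghjkl")
--
-- def _row(c):
--     return 1 if c in ROW1 else 2 if c in ROW2 else 3
--
-- def single_row_recursive(arr):
--     return [w for w in arr if len({_row(c) for c in w}) <= 1]
-- ===== Notes on version B (the rewrite author's own statement) =====
-- stated objective: faster
-- what changed: Replaced recursion over arr[1:] slices with a break-driven enumerate loop per word by a single list comprehension that keeps a word iff the set of its letters' rows has at most one element.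
import Mathlib
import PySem

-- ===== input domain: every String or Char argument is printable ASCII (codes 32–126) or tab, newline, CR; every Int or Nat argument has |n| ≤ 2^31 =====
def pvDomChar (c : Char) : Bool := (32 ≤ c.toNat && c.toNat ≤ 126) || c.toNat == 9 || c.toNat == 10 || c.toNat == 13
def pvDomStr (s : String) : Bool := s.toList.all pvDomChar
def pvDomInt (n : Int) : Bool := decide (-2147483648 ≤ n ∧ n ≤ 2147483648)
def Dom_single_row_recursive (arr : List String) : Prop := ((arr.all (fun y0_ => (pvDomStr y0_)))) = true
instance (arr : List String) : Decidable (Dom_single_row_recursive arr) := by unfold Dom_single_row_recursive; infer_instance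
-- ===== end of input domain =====

-- B replaces A's list-slicing recursion and break-driven index loop by one filter pass
-- testing that the set of a word's letter rows has at most one element (objective: faster).

-- ===== PORT A =====
def row1 : List Char := ['q', 'w', 'e', 'r', 't', 'y', 'u', 'i', 'o', 'p']

def row2 : List Char := ['a', 's', 'd', 'f', 'g', 'h', 'j', 'k', 'l']

def get_row (c : Char) : Int :=
  if c ∈ row1 then 1
  else if c ∈ row2 then 2
  else 3

-- the 'for index, letter in enumerate(item): … break …' loop of A, carrying retArr
def loopA (item : String) (n : Nat) (row : Int) : List Char → Nat → List String → List String
  | [], _, ret => ret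
  | letter :: rest, index, ret =>
    if get_row letter ≠ row then ret
    else loopA item n row rest (index + 1) (if index = n - 1 then ret ++ [item] else ret)

def single_row_recursive : List String → List String
  | [] => []
  | item :: rest =>
    (match item.toList with
     | [] => [item]      -- item == ""
     | c :: _ => loopA item item.toList.length (get_row c) item.toList 0 [])
    ++ single_row_recursive rest

-- ===== PORT B =====
def rowB (c : Char) : Int :=
  if PySem.Set.contains (PySem.Set.ofList "qwertyuiop".toList) c then 1
  else if PySem.Set.contains (PySem.Set.ofList "asdfghjkl".toList) c then 2
  else 3

def single_row_recursive_alt (arr : List String) : List String :=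
  arr.filter (fun w => (PySem.Set.ofList (w.toList.map rowB)).length ≤ 1)

-- ===== PRECONDITION & SPEC =====
def Spec_single_row_recursive (arr : List String) (out : List String) : Prop := out = single_row_recursive_alt arr
instance (arr : List String) (out : List String) : Decidable (Spec_single_row_recursive arr out) := by unfold Spec_single_row_recursive; infer_instance

-- ===== CLAIM (what is proved, stated in full; the proofs are below) =====
def Claim_equal_single_row_recursive : Prop := ∀ (arr : List String), Dom_single_row_recursive arr → Spec_single_row_recursive arr (single_row_recursive arr)

-- ===== LEMMAS AND PROOFS =====
theorem rowB_eq_get_row (c : Char) : rowB c = get_row c := by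
  unfold rowB get_row
  rw [show "qwertyuiop".toList = row1 from rfl, show "asdfghjkl".toList = row2 from rfl]
  simp [PySem.Set.mem_ofList]

theorem list_len_le_one_iff {α : Type} (l : List α) (hn : l.Nodup) :
    l.length ≤ 1 ↔ ∀ x ∈ l, ∀ y ∈ l, x = y := by
  cases l with
  | nil => simp
  | cons a t =>
    cases t with
    | nil => simp
    | cons b t' =>
      simp only [List.length_cons]
      constructor
      · intro h; omega
      · intro h
        exfalso
        have hab : a = b := h a (by simp) b (by simp)
        simp [List.nodup_cons, hab] at hn

theorem setlen_le_one {α : Type} [BEq α] [LawfulBEq α] (m : List α) :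
    (PySem.Set.ofList m).length ≤ 1 ↔ ∀ x ∈ m, ∀ y ∈ m, x = y := by
  rw [list_len_le_one_iff _ (PySem.Set.nodup_ofList m)]
  simp [PySem.Set.mem_ofList]

theorem loopA_spec (item : String) (row : Int) :
    ∀ (chars : List Char) (index : Nat) (ret : List String),
      index + chars.length = item.toList.length →
      loopA item item.toList.length row chars index ret =
        ret ++ (if chars ≠ [] ∧ ∀ x ∈ chars, get_row x = row then [item] else []) := by
  intro chars
  induction chars with
  | nil => intro index ret _; simp [loopA]
  | cons c rest ih =>
    intro index ret h
    simp only [List.length_cons] at h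
    unfold loopA
    by_cases hc : get_row c = row
    · rw [if_neg (by simp [hc])]
      rcases rest with _ | ⟨d, rest'⟩
      · have hidx : index = item.toList.length - 1 := by
          simp only [List.length_nil] at h; omega
        rw [if_pos hidx]
        simp [loopA, hc]
      · have hidx : ¬ index = item.toList.length - 1 := by
          simp only [List.length_cons] at h; omega
        rw [if_neg hidx]
        rw [ih (index + 1) ret (by simp only [List.length_cons] at h ⊢; omega)]
        by_cases hall : ∀ x ∈ d :: rest', get_row x = row
        · simp [hall, hc]
        · simp [hall, hc]
    · rw [if_pos (by simp [hc])]
      simp [hc]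

theorem step_eq (item : String) :
    (match item.toList with
     | [] => [item]
     | c :: _ => loopA item item.toList.length (get_row c) item.toList 0 []) =
    (if (PySem.Set.ofList (item.toList.map rowB)).length ≤ 1 then [item] else []) := by
  match h : item.toList with
  | [] => simp [PySem.Set.ofList]
  | c :: cs =>
    show loopA item (c :: cs).length (get_row c) (c :: cs) 0 [] = _
    rw [← h]
    rw [loopA_spec item (get_row c) item.toList 0 [] (by simp)]
    rw [h]
    have hiff : (c :: cs ≠ [] ∧ ∀ x ∈ c :: cs, get_row x = get_row c) ↔
        (PySem.Set.ofList ((c :: cs).map rowB)).length ≤ 1 := by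
      rw [setlen_le_one]
      constructor
      · rintro ⟨-, hall⟩ x hx y hy
        simp only [List.mem_map] at hx hy
        obtain ⟨a, ha, rfl⟩ := hx
        obtain ⟨b, hb, rfl⟩ := hy
        rw [rowB_eq_get_row, rowB_eq_get_row, hall a ha, hall b hb]
      · intro hp
        refine ⟨by simp, fun x hx => ?_⟩
        have := hp (rowB x) (List.mem_map.mpr ⟨x, hx, rfl⟩)
          (rowB c) (List.mem_map.mpr ⟨c, by simp, rfl⟩)
        rw [rowB_eq_get_row, rowB_eq_get_row] at this
        exact this
    rw [if_congr hiff rfl rfl]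
    simp

theorem main_eq : ∀ arr, single_row_recursive arr = single_row_recursive_alt arr := by
  intro arr
  induction arr with
  | nil => rfl
  | cons item rest ih =>
    show (match item.toList with
     | [] => [item]
     | c :: _ => loopA item item.toList.length (get_row c) item.toList 0 [])
      ++ single_row_recursive rest = _
    rw [step_eq, ih]
    unfold single_row_recursive_alt
    rw [List.filter_cons]
    by_cases hp : (PySem.Set.ofList (item.toList.map rowB)).length ≤ 1 <;> simp [hp]

-- ===== VERDICT (by name: the statement is the Claim_ definition above) =====
theorem single_row_recursive_spec : Claim_equal_single_row_recursive :=
  fun arr _ => main_eq arr
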